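-- pv_equiv track=rewrite | github.com/rishSaini/AI-Music-Backing-Track-Generator | src/backingtrack/ml_bass_ar/infer.py | _clamp_register
-- ===== SOURCE A (Python) =====
-- def _clamp_register(pitch: int, lo: int, hi: int) -> int:
--     p = int(pitch)
--     while p < lo:
--         p += 12
--     while p > hi:
--         p -= 12
--     if p < lo:
--         p = lo
--     if p > hi:
--         p = hi
--     return p
-- ===== SOURCE B (Python) =====
-- def _clamp_register(pitch: int, lo: int, hi: int) -> int:
--     p = int(pitch)
--     if p < lo:
--         p = lo + ((p - lo) % 12)
--     if p > hi:
--         p = hi - ((hi - p) % 12)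
--     if p < lo:
--         p = lo
--     if p > hi:
--         p = hi
--     return p
-- ===== Notes on version B (the rewrite author's own statement) =====
-- stated objective: faster
-- what changed: Replaced the two octave-stepping while-loops with closed-form modular arithmetic (lo + (p-lo)%12, then hi - (hi-p)%12), keeping the final clamps.
import Mathlib
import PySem

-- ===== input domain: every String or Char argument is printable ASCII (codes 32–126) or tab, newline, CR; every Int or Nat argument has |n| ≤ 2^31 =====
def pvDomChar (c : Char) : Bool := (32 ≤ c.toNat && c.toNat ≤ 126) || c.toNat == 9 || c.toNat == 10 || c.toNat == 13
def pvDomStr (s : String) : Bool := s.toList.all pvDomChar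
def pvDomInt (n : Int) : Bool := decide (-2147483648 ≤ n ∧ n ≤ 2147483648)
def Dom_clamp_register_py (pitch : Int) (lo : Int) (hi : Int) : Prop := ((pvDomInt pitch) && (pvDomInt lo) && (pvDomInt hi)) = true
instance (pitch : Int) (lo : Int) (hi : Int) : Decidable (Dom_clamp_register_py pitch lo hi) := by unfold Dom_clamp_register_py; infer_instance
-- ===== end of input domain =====

-- B replaces A's two octave-stepping while-loops with closed-form modular arithmetic (O(1) instead of loops).


-- ===== PORT A =====
-- while p < lo: p += 12
def pvRaiseLoop (p lo : Int) : Int :=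
  if p < lo then pvRaiseLoop (p + 12) lo else p
termination_by (lo - p).toNat
decreasing_by omega

-- while p > hi: p -= 12
def pvLowerLoop (p hi : Int) : Int :=
  if p > hi then pvLowerLoop (p - 12) hi else p
termination_by (p - hi).toNat
decreasing_by omega

def clamp_register_py (pitch : Int) (lo : Int) (hi : Int) : Int :=
  let p := pitch
  let p := pvRaiseLoop p lo
  let p := pvLowerLoop p hi
  let p := if p < lo then lo else p
  let p := if p > hi then hi else p
  p

-- ===== PORT B =====
def clamp_register_py_alt (pitch : Int) (lo : Int) (hi : Int) : Int :=
  let p := pitch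
  let p := if p < lo then lo + PySem.Int.mod (p - lo) 12 else p
  let p := if p > hi then hi - PySem.Int.mod (hi - p) 12 else p
  let p := if p < lo then lo else p
  let p := if p > hi then hi else p
  p

-- ===== PRECONDITION & SPEC =====
def Spec_clamp_register_py (pitch : Int) (lo : Int) (hi : Int) (out : Int) : Prop := out = clamp_register_py_alt pitch lo hi
instance (pitch : Int) (lo : Int) (hi : Int) (out : Int) : Decidable (Spec_clamp_register_py pitch lo hi out) := by unfold Spec_clamp_register_py; infer_instance

-- ===== CLAIM (what is proved, stated in full; the proofs are below) =====
def Claim_equal_clamp_register_py : Prop := ∀ (pitch : Int) (lo : Int) (hi : Int), Dom_clamp_register_py pitch lo hi → Spec_clamp_register_py pitch lo hi (clamp_register_py pitch lo hi)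

-- ===== LEMMAS AND PROOFS =====
lemma pvRaiseLoop_eq (lo : Int) : ∀ (n : Nat) (p : Int), (lo - p).toNat ≤ n →
    pvRaiseLoop p lo = if p < lo then lo + (p - lo) % 12 else p := by
  intro n
  induction n with
  | zero =>
    intro p h
    rw [pvRaiseLoop]
    have : ¬ p < lo := by omega
    simp [this]
  | succ n ih =>
    intro p h
    rw [pvRaiseLoop]
    by_cases hp : p < lo
    · simp only [hp, if_true]
      rw [ih (p + 12) (by omega)]
      by_cases hp2 : p + 12 < lo
      · simp only [hp2, if_true]
        omega
      · simp only [hp2, if_false]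
        omega
    · simp [hp]

lemma pvLowerLoop_eq (hi : Int) : ∀ (n : Nat) (p : Int), (p - hi).toNat ≤ n →
    pvLowerLoop p hi = if p > hi then hi - (hi - p) % 12 else p := by
  intro n
  induction n with
  | zero =>
    intro p h
    rw [pvLowerLoop]
    have : ¬ p > hi := by omega
    simp [this]
  | succ n ih =>
    intro p h
    rw [pvLowerLoop]
    by_cases hp : p > hi
    · simp only [hp, if_true]
      rw [ih (p - 12) (by omega)]
      by_cases hp2 : p - 12 > hi
      · simp only [hp2, if_true]
        omega
      · simp only [hp2, if_false]
        omega
    · simp [hp]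

-- ===== VERDICT (by name: the statement is the Claim_ definition above) =====
theorem clamp_register_py_spec : Claim_equal_clamp_register_py := by
  intro pitch lo hi _
  unfold Spec_clamp_register_py clamp_register_py clamp_register_py_alt
  dsimp only
  simp only [PySem.Int.mod_eq_emod_of_pos (by norm_num : (0:Int) < 12)]
  rw [pvRaiseLoop_eq lo (lo - pitch).toNat pitch le_rfl]
  generalize (if pitch < lo then lo + (pitch - lo) % 12 else pitch) = r
  rw [pvLowerLoop_eq hi (r - hi).toNat r le_rfl]
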